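-- pv_equiv track=rewrite | github.com/WenchaoLin/ChatCODE | Singleton_Parsimony_count.py | count_variable_sites
-- ===== SOURCE A (Python) =====
-- from collections import Counter
--
-- def count_variable_sites(sequences):
--     positions = []
--     for i in range(len(sequences[0])):
--         bases = set(sequence[i] for sequence in sequences)
--         if len(bases) > 1:
--             positions.append(i)
--
--     singletons = 0
--     parsimony_informative = 0
--     for position in positions:
--         bases = [sequence[position] for sequence in sequences]
--         base_counts = Counter(bases)
--         if base_counts.most_common(1)[0][1] == 1:
--             singletons += 1
--         if len(base_counts) > 1:
--             parsimony_informative += 1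
--
--     return singletons, parsimony_informative
-- ===== SOURCE B (Python) =====
-- from collections import Counter
--
-- def count_variable_sites(sequences):
--     singletons = 0
--     parsimony_informative = 0
--     for i in range(len(sequences[0])):
--         base_counts = Counter(sequence[i] for sequence in sequences)
--         if len(base_counts) > 1:
--             parsimony_informative += 1
--             if max(base_counts.values()) == 1:
--                 singletons += 1
--     return singletons, parsimony_informative
-- ===== Notes on version B (the rewrite author's own statement) =====
-- stated objective: simpler
-- what changed: B makes a single pass over the columns with one Counter per column, deciding both tallies on the spot, instead of A's two-phase scheme (first build a positions list via per-column sets, then rescan those columns with Counters).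
import Mathlib
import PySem

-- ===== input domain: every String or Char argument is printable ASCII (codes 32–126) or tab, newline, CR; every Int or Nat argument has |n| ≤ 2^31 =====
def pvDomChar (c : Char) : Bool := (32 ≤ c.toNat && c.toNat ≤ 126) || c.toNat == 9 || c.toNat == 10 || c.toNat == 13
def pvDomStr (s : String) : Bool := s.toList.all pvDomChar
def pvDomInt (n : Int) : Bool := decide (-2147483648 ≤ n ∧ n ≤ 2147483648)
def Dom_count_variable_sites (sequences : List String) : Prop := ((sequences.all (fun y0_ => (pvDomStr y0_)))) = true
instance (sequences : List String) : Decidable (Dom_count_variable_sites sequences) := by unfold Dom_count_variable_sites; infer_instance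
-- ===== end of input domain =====

-- B merges A's two phases into one pass over the columns: one Counter per column decides both tallies (objective: simpler).

-- ===== PORT A =====
def count_variable_sites (sequences : List String) : Int × Int :=
  -- positions = []; for i in range(len(sequences[0])): bases = set(...); if len(bases) > 1: positions.append(i)
  let positions :=
    (PySem.List.pyRange 0 (PySem.List.len (sequences.headD "").toList) 1).foldl
      (fun acc i =>
        let bases := PySem.Set.ofList (sequences.map (fun s => PySem.List.pyGetD s.toList i ' '))
        if PySem.Set.len bases > 1 then acc ++ [i] else acc) []
  -- for position in positions: … (both indexings are total pyGetD; exact under Pre_, which puts every index in range)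
  positions.foldl
    (fun (acc : Int × Int) position =>
      let bases := sequences.map (fun s => PySem.List.pyGetD s.toList position ' ')
      let base_counts := PySem.Dict.counter bases
      -- most_common(1)[0][1]: first item of the items sorted by count descending (stable), then its count
      let singletons := if ((PySem.List.sorted base_counts.items (fun p => p.2) true).headD (' ', 0)).2 = 1 then acc.1 + 1 else acc.1
      let parsimony_informative := if base_counts.size > 1 then acc.2 + 1 else acc.2
      (singletons, parsimony_informative)) (0, 0)

-- ===== PORT B =====
def count_variable_sites_alt (sequences : List String) : Int × Int :=
  (PySem.List.pyRange 0 (PySem.List.len (sequences.headD "").toList) 1).foldl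
    (fun (acc : Int × Int) i =>
      let base_counts := PySem.Dict.counter (sequences.map (fun s => PySem.List.pyGetD s.toList i ' '))
      if base_counts.size > 1 then
        (if (PySem.List.max? base_counts.values (fun v => v)).getD 0 = 1 then acc.1 + 1 else acc.1,
         acc.2 + 1)
      else acc) (0, 0)

-- ===== PRECONDITION & SPEC =====
-- Pre_ excludes exactly the inputs on which Python A raises IndexError: the empty list
-- (sequences[0] raises) and inputs where some sequence is shorter than sequences[0].
def Pre_count_variable_sites (sequences : List String) : Prop :=
  sequences ≠ [] ∧ ∀ s ∈ sequences, (sequences.headD "").length ≤ s.length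
instance (sequences : List String) : Decidable (Pre_count_variable_sites sequences) := by
  unfold Pre_count_variable_sites; infer_instance
def pvWitness_count_variable_sites : List String := ["ACGT", "ACCA", "AGGT"]

def Spec_count_variable_sites (sequences : List String) (out : Int × Int) : Prop := out = count_variable_sites_alt sequences
instance (sequences : List String) (out : Int × Int) : Decidable (Spec_count_variable_sites sequences out) := by unfold Spec_count_variable_sites; infer_instance

-- ===== CLAIM (what is proved, stated in full; the proofs are below) =====
def Claim_equal_count_variable_sites : Prop := ∀ (sequences : List String), Dom_count_variable_sites sequences → Pre_count_variable_sites sequences → Spec_count_variable_sites sequences (count_variable_sites sequences)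

-- ===== LEMMAS AND PROOFS =====

-- the number of distinct keys of Counter(cs) equals len(set(cs))
theorem counter_size_eq_set_len (cs : List Char) :
    ((PySem.Dict.counter cs).size : Int) = PySem.Set.len (PySem.Set.ofList cs) := by
  have hk : (PySem.Dict.counter cs).keys = PySem.Set.ofList cs := PySem.Dict.keys_counter cs
  have : (PySem.Dict.counter cs).keys.length = (PySem.Set.ofList cs).length := by rw [hk]
  simp only [PySem.Dict.keys, List.length_map] at this
  simp [PySem.Dict.size, PySem.Set.len, this]

-- most_common(1)[0][1] equals max(values) on a nonempty items list
theorem head_sorted_rev_eq_max (l : List (Char × Int)) (h : l ≠ []) :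
    ((PySem.List.sorted l (fun p => p.2) true).headD (' ', 0)).2
      = ((PySem.List.max? (l.map (·.2)) (fun v => v)).getD 0) := by
  obtain ⟨m, t, hs⟩ : ∃ m t, PySem.List.sorted l (fun p => p.2) true = m :: t := by
    cases hsv : PySem.List.sorted l (fun p => p.2) true with
    | nil => exact absurd ((PySem.List.sorted_eq_nil_iff l _ true).mp hsv) h
    | cons m t => exact ⟨m, t, rfl⟩
  have hge := PySem.List.key_head_sorted_rev_ge l (fun p => p.2) hs
  have hm : m ∈ l := (PySem.List.mem_sorted l _ true m).mp (hs ▸ List.mem_cons_self)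
  cases hmax : PySem.List.max? (l.map (·.2)) (fun v => v) with
  | none =>
      have := (PySem.List.max?_eq_none_iff _ _).mp hmax
      simp at this; exact absurd this h
  | some mv =>
      have h1 : m.2 ≤ mv := PySem.List.max?_isMax hmax m.2 (List.mem_map_of_mem hm)
      have h2 : mv ≤ m.2 := by
        have := PySem.List.max?_mem hmax
        obtain ⟨y, hy, hyv⟩ := List.mem_map.mp this
        exact hyv ▸ hge y hy
      rw [hs]
      simpa using le_antisymm h1 h2

-- the two ports agree (everywhere: both are total with pyGetD)
theorem count_eq_alt (sequences : List String) :
    count_variable_sites sequences = count_variable_sites_alt sequences := by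
  unfold count_variable_sites count_variable_sites_alt
  simp only []
  rw [PySem.List.foldl_append_ite_eq_filter
    (fun i => PySem.Set.len (PySem.Set.ofList (sequences.map (fun s => PySem.List.pyGetD s.toList i ' '))) > 1)]
  rw [List.nil_append, ← PySem.List.foldl_ite_eq_foldl_filter]
  congr 1
  funext acc i
  set cs := sequences.map (fun s => PySem.List.pyGetD s.toList i ' ') with hcs
  have hsz : ((PySem.Dict.counter cs).size : Int) = PySem.Set.len (PySem.Set.ofList cs) :=
    counter_size_eq_set_len cs
  by_cases hp : PySem.Set.len (PySem.Set.ofList cs) > 1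
  · have hszgt : (PySem.Dict.counter cs).size > 1 := by omega
    have hne : (PySem.Dict.counter cs).items ≠ [] := by
      intro hnil
      simp [PySem.Dict.size, hnil] at hszgt
    rw [if_pos hp, if_pos hszgt]
    have hmax := head_sorted_rev_eq_max (PySem.Dict.counter cs).items hne
    simp only [PySem.Dict.values, hmax]
    rw [if_pos hszgt]
    rfl
  · have hszle : ¬ ((PySem.Dict.counter cs).size > 1) := by omega
    rw [if_neg hp, if_neg hszle]

-- ===== VERDICT (by name: the statement is the Claim_ definition above) =====
theorem count_variable_sites_spec : Claim_equal_count_variable_sites := by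
  intro sequences _ _
  unfold Spec_count_variable_sites
  exact count_eq_alt sequences
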